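-- pv_equiv track=rewrite | github.com/increpare/PuzzleScript | gen_trees.py | expand_meta_tiles
-- ===== SOURCE A (Python) =====
-- def expand_meta_tiles(tile_list, obj_to_idxs, meta_tiles):
--     expanded_meta_tiles = []
--     for mt in tile_list:
--         if mt in obj_to_idxs:
--             expanded_meta_tiles.append(mt)
--         elif mt in tile_list:
--             expanded_meta_tiles += expand_meta_tiles(meta_tiles[mt], obj_to_idxs, meta_tiles)
--     return expanded_meta_tiles
-- ===== SOURCE B (Python) =====
-- def expand_meta_tiles(tile_list, obj_to_idxs, meta_tiles):
--     result = []
--     stack = list(tile_list)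
--     stack.reverse()
--     while stack:
--         mt = stack.pop()
--         if mt in obj_to_idxs:
--             result.append(mt)
--         else:
--             stack.extend(reversed(meta_tiles[mt]))
--     return result
-- ===== Notes on version B (the rewrite author's own statement) =====
-- stated objective: alternative
-- what changed: Replaces A's recursive flattening (recursion into meta_tiles[mt] inside a loop with list concatenation) by an iterative depth-first traversal with an explicit stack seeded with the tiles and popped left-to-right.
import Mathlib
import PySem

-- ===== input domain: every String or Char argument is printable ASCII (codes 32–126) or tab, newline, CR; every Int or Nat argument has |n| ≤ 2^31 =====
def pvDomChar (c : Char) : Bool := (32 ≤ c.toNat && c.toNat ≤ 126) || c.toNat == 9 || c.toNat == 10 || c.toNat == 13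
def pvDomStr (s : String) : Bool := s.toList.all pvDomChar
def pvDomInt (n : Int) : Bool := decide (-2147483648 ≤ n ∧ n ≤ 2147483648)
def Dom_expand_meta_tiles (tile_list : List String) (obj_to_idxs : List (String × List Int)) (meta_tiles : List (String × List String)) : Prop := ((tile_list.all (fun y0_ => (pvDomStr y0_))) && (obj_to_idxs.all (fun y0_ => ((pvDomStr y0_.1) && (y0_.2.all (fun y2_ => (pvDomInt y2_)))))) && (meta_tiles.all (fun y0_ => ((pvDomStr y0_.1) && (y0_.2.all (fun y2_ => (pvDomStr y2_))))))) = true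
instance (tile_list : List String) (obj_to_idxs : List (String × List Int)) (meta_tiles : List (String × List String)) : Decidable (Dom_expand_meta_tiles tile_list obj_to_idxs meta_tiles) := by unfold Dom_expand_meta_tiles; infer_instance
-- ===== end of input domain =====

-- B replaces A's recursive flattening by an iterative DFS with an explicit stack (objective: alternative,
-- same asymptotic cost); on inputs where A raises (KeyError / unbounded recursion, excluded by Pre_) B raises or diverges.

-- ===== PORT A =====
-- dict key membership 'k in d' (first component of the association list)
def pvKeyMem {α : Type} (d : List (String × α)) (k : String) : Bool := d.any (fun p => p.1 == k)
-- dict lookup d[k]: FIRST matching pair; none = KeyError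
def pvLookup {α : Type} (d : List (String × α)) (k : String) : Option α :=
  (d.find? (fun p => p.1 == k)).map Prod.snd

-- A's recursion, made total with a depth fuel; under Pre_ the depth needed is ≤ meta_tiles.length + 1.
def expand_meta_tiles_go (obj_to_idxs : List (String × List Int)) (meta_tiles : List (String × List String)) : Nat → List String → List String
  | 0, _ => []
  | f + 1, tl =>
      tl.foldl (fun acc mt =>
        if pvKeyMem obj_to_idxs mt then acc ++ [mt]
        else if tl.contains mt then
          acc ++ (match pvLookup meta_tiles mt with
                  | some cs => expand_meta_tiles_go obj_to_idxs meta_tiles f cs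
                  | none => [])   -- Python raises KeyError here; excluded by Pre_
        else acc) []

def expand_meta_tiles (tile_list : List String) (obj_to_idxs : List (String × List Int)) (meta_tiles : List (String × List String)) : List String :=
  expand_meta_tiles_go obj_to_idxs meta_tiles (meta_tiles.length + 1) tile_list

-- ===== PORT B =====
-- Fuel for B's while-loop (one unit per iteration; Python needs none). bndB bounds the number of
-- stack pops one tile can cause, given the maximal children-list length C of meta_tiles.
def maxChildLen (meta_tiles : List (String × List String)) : Nat :=
  (meta_tiles.map (fun p => p.2.length)).foldl max 0

def bndB (C : Nat) : Nat → Nat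
  | 0 => 1
  | n + 1 => 1 + C * bndB C n

-- The stack is modelled with its TOP at the HEAD: Python seeds it with reversed(tile_list) and pops/extends
-- at the right end, which is exactly popping the head of tile_list and consing the children in order.
def expand_meta_tiles_loop (obj_to_idxs : List (String × List Int)) (meta_tiles : List (String × List String)) : Nat → List String → List String → List String
  | _, [], result => result
  | 0, _ :: _, result => result          -- fuel exhausted: unreachable under Pre_
  | f + 1, mt :: stack, result =>
      if pvKeyMem obj_to_idxs mt then expand_meta_tiles_loop obj_to_idxs meta_tiles f stack (result ++ [mt])
      else match pvLookup meta_tiles mt with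
           | some cs => expand_meta_tiles_loop obj_to_idxs meta_tiles f (cs ++ stack) result
           | none => result              -- Python raises KeyError here; excluded by Pre_

def expand_meta_tiles_alt (tile_list : List String) (obj_to_idxs : List (String × List Int)) (meta_tiles : List (String × List String)) : List String :=
  expand_meta_tiles_loop obj_to_idxs meta_tiles
    (tile_list.length * bndB (maxChildLen meta_tiles) meta_tiles.length) tile_list []

-- ===== PRECONDITION & SPEC =====
-- 'goodTile n t' : expanding t bottoms out in obj_to_idxs keys within meta-depth n.
def goodTile (obj_to_idxs : List (String × List Int)) (meta_tiles : List (String × List String)) : Nat → String → Bool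
  | 0, t => pvKeyMem obj_to_idxs t
  | n + 1, t =>
      goodTile obj_to_idxs meta_tiles n t ||
      (match pvLookup meta_tiles t with
       | some cs => cs.all (goodTile obj_to_idxs meta_tiles n)
       | none => false)

-- Pre_ holds exactly when every tile's expansion is well-founded and bottoms out in obj_to_idxs keys
-- (depth meta_tiles.length always suffices: a deeper terminating chain would repeat a key, i.e. cycle);
-- outside Pre_ the Python A raises KeyError or RecursionError and returns no value.
def Pre_expand_meta_tiles (tile_list : List String) (obj_to_idxs : List (String × List Int)) (meta_tiles : List (String × List String)) : Prop :=
  tile_list.all (goodTile obj_to_idxs meta_tiles meta_tiles.length) = true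

instance (tile_list : List String) (obj_to_idxs : List (String × List Int)) (meta_tiles : List (String × List String)) : Decidable (Pre_expand_meta_tiles tile_list obj_to_idxs meta_tiles) := by unfold Pre_expand_meta_tiles; infer_instance

def pvWitness_expand_meta_tiles : List String × (List (String × List Int)) × (List (String × List String)) :=
  (["m", "a"], [("a", [0]), ("b", [1])], [("m", ["a", "b", "a"])])

def Spec_expand_meta_tiles (tile_list : List String) (obj_to_idxs : List (String × List Int)) (meta_tiles : List (String × List String)) (out : List String) : Prop := out = expand_meta_tiles_alt tile_list obj_to_idxs meta_tiles
instance (tile_list : List String) (obj_to_idxs : List (String × List Int)) (meta_tiles : List (String × List String)) (out : List String) : Decidable (Spec_expand_meta_tiles tile_list obj_to_idxs meta_tiles out) := by unfold Spec_expand_meta_tiles; infer_instance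

-- ===== CLAIM (what is proved, stated in full; the proofs are below) =====
def Claim_equal_expand_meta_tiles : Prop := ∀ (tile_list : List String) (obj_to_idxs : List (String × List Int)) (meta_tiles : List (String × List String)), Dom_expand_meta_tiles tile_list obj_to_idxs meta_tiles → Pre_expand_meta_tiles tile_list obj_to_idxs meta_tiles → Spec_expand_meta_tiles tile_list obj_to_idxs meta_tiles (expand_meta_tiles tile_list obj_to_idxs meta_tiles)

-- ===== LEMMAS AND PROOFS =====

-- the common specification both ports are reduced to: depth-fuelled one-tile expansion
def specOne (obj_to_idxs : List (String × List Int)) (meta_tiles : List (String × List String)) : Nat → String → List String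
  | 0, t => if pvKeyMem obj_to_idxs t then [t] else []
  | n + 1, t =>
      if pvKeyMem obj_to_idxs t then [t]
      else match pvLookup meta_tiles t with
           | some cs => cs.flatMap (specOne obj_to_idxs meta_tiles n)
           | none => []

-- exact number of loop iterations B spends on one tile
def costOne (obj_to_idxs : List (String × List Int)) (meta_tiles : List (String × List String)) : Nat → String → Nat
  | 0, _ => 1
  | n + 1, t =>
      if pvKeyMem obj_to_idxs t then 1
      else match pvLookup meta_tiles t with
           | some cs => 1 + (cs.map (costOne obj_to_idxs meta_tiles n)).sum
           | none => 1

theorem goodTile_succ {obj : List (String × List Int)} {mts : List (String × List String)} {n : Nat} {t : String}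
    (h : goodTile obj mts n t = true) : goodTile obj mts (n + 1) t = true := by
  simp [goodTile, h]

theorem goodTile_nonbase {obj : List (String × List Int)} {mts : List (String × List String)} :
    ∀ {n : Nat} {t : String}, goodTile obj mts (n + 1) t = true → pvKeyMem obj t = false →
      ∃ cs, pvLookup mts t = some cs ∧ ∀ c ∈ cs, goodTile obj mts n c = true := by
  intro n
  induction n with
  | zero =>
      intro t h hb
      simp [goodTile, hb] at h
      cases hcs : pvLookup mts t with
      | none => simp [hcs] at h
      | some cs => exact ⟨cs, rfl, by simpa [hcs, List.all_eq_true] using h⟩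
  | succ m ih =>
      intro t h hb
      rw [show m + 1 + 1 = (m + 1) + 1 from rfl, goodTile] at h
      rcases Bool.or_eq_true_iff.mp h with h' | h'
      · rcases ih h' hb with ⟨cs, hcs, hall⟩
        exact ⟨cs, hcs, fun c hc => goodTile_succ (hall c hc)⟩
      · cases hcs : pvLookup mts t with
        | none => simp [hcs] at h'
        | some cs => exact ⟨cs, rfl, by simpa [hcs, List.all_eq_true] using h'⟩

-- A's fuelled recursion computes the flatMap of specOne
theorem goA_step {obj : List (String × List Int)} {mts : List (String × List String)} (e : Nat) (tl : List String) :
    expand_meta_tiles_go obj mts (e + 1) tl =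
      tl.flatMap (fun mt => if pvKeyMem obj mt then [mt]
        else match pvLookup mts mt with
             | some cs => expand_meta_tiles_go obj mts e cs
             | none => []) := by
  rw [expand_meta_tiles_go]
  rw [PySem.List.foldl_congr_mem tl _
    (fun acc mt => acc ++ (if pvKeyMem obj mt then [mt]
      else match pvLookup mts mt with
           | some cs => expand_meta_tiles_go obj mts e cs
           | none => [])) []
    (by
      intro acc mt hmt
      have hc : tl.contains mt = true := by simpa using hmt
      by_cases hb : pvKeyMem obj mt = true <;> simp [hb, hmt])]
  rw [PySem.List.foldl_append_eq_flatMap]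
  simp

theorem goA_eq_flatMap {obj : List (String × List Int)} {mts : List (String × List String)} :
    ∀ (n : Nat) (f : Nat) (tl : List String), n < f → (∀ t ∈ tl, goodTile obj mts n t = true) →
      expand_meta_tiles_go obj mts f tl = tl.flatMap (specOne obj mts n) := by
  intro n
  induction n with
  | zero =>
      intro f tl hf hall
      obtain ⟨e, rfl⟩ := Nat.exists_eq_succ_of_ne_zero (by omega : f ≠ 0)
      rw [goA_step]
      apply List.flatMap_congr
      intro t ht
      have hb : pvKeyMem obj t = true := by simpa [goodTile] using hall t ht
      simp [hb, specOne]
  | succ m ih =>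
      intro f tl hf hall
      obtain ⟨e, rfl⟩ := Nat.exists_eq_succ_of_ne_zero (by omega : f ≠ 0)
      rw [goA_step]
      apply List.flatMap_congr
      intro t ht
      by_cases hb : pvKeyMem obj t = true
      · simp [hb, specOne]
      · have hbf : pvKeyMem obj t = false := Bool.eq_false_iff.mpr hb
        rcases goodTile_nonbase (hall t ht) hbf with ⟨cs, hcs, hcall⟩
        have hrec : expand_meta_tiles_go obj mts e cs = cs.flatMap (specOne obj mts m) :=
          ih e cs (by omega) hcall
        simp [hbf, hcs, hrec, specOne]

-- B's loop consumes exactly costOne fuel per tile and emits specOne of it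
theorem loopB_one {obj : List (String × List Int)} {mts : List (String × List String)} :
    ∀ (n : Nat) (t : String), goodTile obj mts n t = true →
      ∀ (st acc : List String) (f : Nat),
        expand_meta_tiles_loop obj mts (costOne obj mts n t + f) (t :: st) acc =
          expand_meta_tiles_loop obj mts f st (acc ++ specOne obj mts n t) := by
  intro n
  induction n with
  | zero =>
      intro t h st acc f
      have hb : pvKeyMem obj t = true := by simpa [goodTile] using h
      simp only [costOne, specOne]
      rw [Nat.add_comm 1 f]
      simp [expand_meta_tiles_loop, hb]
  | succ m ih =>
      intro t h st acc f
      by_cases hb : pvKeyMem obj t = true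
      · have hcost : costOne obj mts (m + 1) t = 1 := by simp [costOne, hb]
        have hspec : specOne obj mts (m + 1) t = [t] := by simp [specOne, hb]
        rw [hcost, hspec, Nat.add_comm 1 f]
        simp [expand_meta_tiles_loop, hb]
      · have hbf : pvKeyMem obj t = false := Bool.eq_false_iff.mpr hb
        rcases goodTile_nonbase h hbf with ⟨cs, hcs, hcall⟩
        have hlist : ∀ (cs' : List String), (∀ c ∈ cs', goodTile obj mts m c = true) →
            ∀ (st acc : List String) (f : Nat),
              expand_meta_tiles_loop obj mts ((cs'.map (costOne obj mts m)).sum + f) (cs' ++ st) acc =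
                expand_meta_tiles_loop obj mts f st (acc ++ cs'.flatMap (specOne obj mts m)) := by
          intro cs'
          induction cs' with
          | nil => intro _ st acc f; simp
          | cons c cs'' ihc =>
              intro hall st acc f
              have h1 := ih c (hall c (List.mem_cons_self)) (cs'' ++ st) acc
                ((cs''.map (costOne obj mts m)).sum + f)
              simp only [List.map_cons, List.sum_cons, List.cons_append]
              rw [Nat.add_assoc, h1, ihc (fun c hc => hall c (List.mem_cons_of_mem _ hc)) st _ f]
              simp [List.flatMap_cons, List.append_assoc]
        have hcost : costOne obj mts (m + 1) t = 1 + (cs.map (costOne obj mts m)).sum := by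
          simp [costOne, hbf, hcs]
        have hspec : specOne obj mts (m + 1) t = cs.flatMap (specOne obj mts m) := by
          simp [specOne, hbf, hcs]
        rw [hcost, hspec, Nat.add_assoc, Nat.add_comm 1 _]
        have hstep : expand_meta_tiles_loop obj mts (((cs.map (costOne obj mts m)).sum + f) + 1) (t :: st) acc
            = expand_meta_tiles_loop obj mts ((cs.map (costOne obj mts m)).sum + f) (cs ++ st) acc := by
          simp [expand_meta_tiles_loop, hbf, hcs]
        rw [hstep, hlist cs hcall st acc f]

theorem loopB_list {obj : List (String × List Int)} {mts : List (String × List String)} (n : Nat) :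
    ∀ (cs : List String), (∀ c ∈ cs, goodTile obj mts n c = true) →
      ∀ (st acc : List String) (f : Nat),
        expand_meta_tiles_loop obj mts ((cs.map (costOne obj mts n)).sum + f) (cs ++ st) acc =
          expand_meta_tiles_loop obj mts f st (acc ++ cs.flatMap (specOne obj mts n)) := by
  intro cs
  induction cs with
  | nil => intro _ st acc f; simp
  | cons c cs' ihc =>
      intro hall st acc f
      simp only [List.map_cons, List.sum_cons, List.cons_append]
      rw [Nat.add_assoc, loopB_one n c (hall c (List.mem_cons_self)) _ _ _,
        ihc (fun c hc => hall c (List.mem_cons_of_mem _ hc)) st _ f]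
      simp [List.flatMap_cons, List.append_assoc]

theorem lookup_len_le {mts : List (String × List String)} {t : String} {cs : List String}
    (h : pvLookup mts t = some cs) : cs.length ≤ maxChildLen mts := by
  have hm : cs ∈ mts.map (fun p => p.2) := by
    unfold pvLookup at h
    cases hf : mts.find? (fun p => p.1 == t) with
    | none => simp [hf] at h
    | some p =>
        have : p ∈ mts := List.mem_of_find?_eq_some hf
        simp [hf] at h
        exact h ▸ List.mem_map.mpr ⟨p, this, rfl⟩
  have : cs.length ∈ (mts.map (fun p => p.2.length)) := by
    rcases List.mem_map.mp hm with ⟨p, hp, hpe⟩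
    exact List.mem_map.mpr ⟨p, hp, by simp [hpe]⟩
  exact (PySem.List.le_foldl_max (mts.map (fun p => p.2.length)) 0).2 _ this

theorem costOne_le_bnd {obj : List (String × List Int)} {mts : List (String × List String)} :
    ∀ (n : Nat) (t : String), costOne obj mts n t ≤ bndB (maxChildLen mts) n := by
  intro n
  induction n with
  | zero => intro t; simp [costOne, bndB]
  | succ m ih =>
      intro t
      by_cases hb : pvKeyMem obj t = true
      · simp [costOne, hb, bndB]
      · have hbf : pvKeyMem obj t = false := Bool.eq_false_iff.mpr hb
        cases hcs : pvLookup mts t with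
        | none => simp [costOne, hbf, hcs, bndB]
        | some cs =>
            have hcost : costOne obj mts (m + 1) t = 1 + (cs.map (costOne obj mts m)).sum := by
              simp [costOne, hbf, hcs]
            rw [hcost, bndB]
            have h1 : (cs.map (costOne obj mts m)).sum ≤ cs.length * bndB (maxChildLen mts) m := by
              calc (cs.map (costOne obj mts m)).sum
                  ≤ (cs.map (costOne obj mts m)).length * bndB (maxChildLen mts) m := by
                    apply List.sum_le_card_nsmul
                    intro x hx
                    rcases List.mem_map.mp hx with ⟨c, _, rfl⟩
                    exact ih c
                _ = cs.length * bndB (maxChildLen mts) m := by simp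
            have h2 : cs.length * bndB (maxChildLen mts) m ≤ maxChildLen mts * bndB (maxChildLen mts) m :=
              Nat.mul_le_mul_right _ (lookup_len_le hcs)
            omega

-- ===== VERDICT (by name: the statement is the Claim_ definition above) =====
theorem expand_meta_tiles_spec : Claim_equal_expand_meta_tiles := by
  intro tl obj mts _ hpre
  unfold Spec_expand_meta_tiles
  unfold Pre_expand_meta_tiles at hpre
  rw [List.all_eq_true] at hpre
  have hall : ∀ t ∈ tl, goodTile obj mts mts.length t = true := fun t ht => hpre t ht
  have hA : expand_meta_tiles tl obj mts = tl.flatMap (specOne obj mts mts.length) :=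
    goA_eq_flatMap mts.length (mts.length + 1) tl (Nat.lt_succ_self _) hall
  have hsum : (tl.map (costOne obj mts mts.length)).sum ≤ tl.length * bndB (maxChildLen mts) mts.length := by
    calc (tl.map (costOne obj mts mts.length)).sum
        ≤ (tl.map (costOne obj mts mts.length)).length * bndB (maxChildLen mts) mts.length := by
          apply List.sum_le_card_nsmul
          intro x hx
          rcases List.mem_map.mp hx with ⟨c, _, rfl⟩
          exact costOne_le_bnd mts.length c
      _ = tl.length * bndB (maxChildLen mts) mts.length := by simp
  have hB : expand_meta_tiles_alt tl obj mts = tl.flatMap (specOne obj mts mts.length) := by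
    unfold expand_meta_tiles_alt
    have key := loopB_list (obj := obj) (mts := mts) mts.length tl hall [] []
      (tl.length * bndB (maxChildLen mts) mts.length - (tl.map (costOne obj mts mts.length)).sum)
    rw [List.append_nil] at key
    rw [show tl.length * bndB (maxChildLen mts) mts.length =
        (tl.map (costOne obj mts mts.length)).sum +
          (tl.length * bndB (maxChildLen mts) mts.length - (tl.map (costOne obj mts mts.length)).sum) from by omega]
    rw [key]
    cases tl.length * bndB (maxChildLen mts) mts.length - (tl.map (costOne obj mts mts.length)).sum <;>
      simp [expand_meta_tiles_loop]
  rw [hA, hB]
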